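-- pv_equiv track=rewrite | github.com/kraujinis/code_academy | lesson_11/exercise_2.py.py | who_win
-- ===== SOURCE A (Python) =====
-- def who_win(numbers: list[int]) -> int:
--     odd = []
--     even = []
--     for item in numbers:
--         if item % 2 == 0:
--             odd.append(item)
--         else:
--             even.append(item)
--     if sum(odd) > sum(even):
--         return sum(odd)
--     elif sum(odd) < sum(even):
--         return sum(even)
-- ===== SOURCE B (Python) =====
-- def who_win(numbers: list[int]) -> int:
--     # Signed-sum trick: d = even_sum - odd_sum, so even_sum = (total + d) // 2
--     # and odd_sum = (total - d) // 2; compare via the sign of d alone.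
--     total = sum(numbers)
--     d = sum(x if x % 2 == 0 else -x for x in numbers)
--     if d > 0:
--         return (total + d) // 2
--     if d < 0:
--         return (total - d) // 2
-- ===== Notes on version B (the rewrite author's own statement) =====
-- stated objective: alternative
-- what changed: B never partitions or sums the two classes separately: it computes the total and the signed difference d = even_sum - odd_sum in one signed pass, decides the winner from the sign of d alone, and recovers the winning sum arithmetically as (total +/- d) // 2.
import Mathlib
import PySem

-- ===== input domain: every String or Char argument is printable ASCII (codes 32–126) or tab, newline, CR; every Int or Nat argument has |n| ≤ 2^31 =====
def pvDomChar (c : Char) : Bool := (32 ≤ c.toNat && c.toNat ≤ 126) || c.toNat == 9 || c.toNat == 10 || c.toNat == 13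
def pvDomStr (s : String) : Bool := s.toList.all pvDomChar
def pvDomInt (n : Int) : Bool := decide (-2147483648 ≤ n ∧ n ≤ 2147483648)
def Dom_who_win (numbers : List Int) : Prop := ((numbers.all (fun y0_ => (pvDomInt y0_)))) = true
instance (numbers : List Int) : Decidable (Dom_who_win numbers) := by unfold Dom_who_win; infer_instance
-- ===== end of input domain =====

-- B replaces A's two-list partition with one signed pass: d = even_sum - odd_sum decides
-- the winner by its sign, and the winning sum is recovered as (total ± d) // 2.

-- ===== PORT A =====
-- A appends each item to one of two lists (evens into `odd`, odds into `even` — A's own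
-- misnamed variables), then compares the two list sums.
def who_win (numbers : List Int) : Option Int :=
  let p := numbers.foldl
    (fun (st : List Int × List Int) item =>
      if PySem.Int.mod item 2 = 0 then (st.1 ++ [item], st.2) else (st.1, st.2 ++ [item]))
    ([], [])
  if p.1.sum > p.2.sum then some p.1.sum
  else if p.1.sum < p.2.sum then some p.2.sum
  else none

-- ===== PORT B =====
def who_win_alt (numbers : List Int) : Option Int :=
  let total := numbers.sum
  let d := (numbers.map (fun x => if PySem.Int.mod x 2 = 0 then x else -x)).sum
  if d > 0 then some (PySem.Int.floordiv (total + d) 2)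
  else if d < 0 then some (PySem.Int.floordiv (total - d) 2)
  else none

-- ===== PRECONDITION & SPEC =====
def Spec_who_win (numbers : List Int) (out : Option Int) : Prop := out = who_win_alt numbers
instance (numbers : List Int) (out : Option Int) : Decidable (Spec_who_win numbers out) := by unfold Spec_who_win; infer_instance

-- ===== CLAIM (what is proved, stated in full; the proofs are below) =====
def Claim_equal_who_win : Prop := ∀ (numbers : List Int), Dom_who_win numbers → Spec_who_win numbers (who_win numbers)

-- ===== LEMMAS AND PROOFS =====

-- A's fold, for any Bool predicate, is list partition by append.
theorem who_win_foldl_partition (p : Int → Bool) (numbers : List Int) (a b : List Int) :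
    numbers.foldl
      (fun (st : List Int × List Int) item =>
        if p item then (st.1 ++ [item], st.2) else (st.1, st.2 ++ [item]))
      (a, b)
    = (a ++ numbers.filter p, b ++ numbers.filter (fun x => !p x)) := by
  induction numbers generalizing a b with
  | nil => simp
  | cons x xs ih =>
    simp only [List.foldl_cons, List.filter_cons]
    cases h : p x <;> simp [ih, List.append_assoc]

-- B's signed map-sum is (sum of p-elements) - (sum of non-p-elements).
theorem who_win_signed_sum (p : Int → Bool) (numbers : List Int) :
    (numbers.map (fun x => if p x then x else -x)).sum
      = (numbers.filter p).sum - (numbers.filter (fun x => !p x)).sum := by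
  induction numbers with
  | nil => simp
  | cons x xs ih =>
    simp only [List.map_cons, List.filter_cons]
    cases h : p x <;> simp [ih] <;> ring

theorem who_win_sum_split (p : Int → Bool) (numbers : List Int) :
    (numbers.filter p).sum + (numbers.filter (fun x => !p x)).sum = numbers.sum := by
  induction numbers with
  | nil => simp
  | cons x xs ih =>
    simp only [List.filter_cons]
    cases h : p x <;> simp <;> omega

-- ===== VERDICT (by name: the statement is the Claim_ definition above) =====
theorem who_win_spec : Claim_equal_who_win := by
  intro numbers _
  unfold Spec_who_win who_win who_win_alt
  have hfun : (fun (st : List Int × List Int) item =>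
        if PySem.Int.mod item 2 = 0 then (st.1 ++ [item], st.2) else (st.1, st.2 ++ [item]))
      = (fun (st : List Int × List Int) item =>
        if (fun x => decide (PySem.Int.mod x 2 = 0)) item = true then (st.1 ++ [item], st.2)
        else (st.1, st.2 ++ [item])) := by funext st item; simp
  rw [hfun, who_win_foldl_partition (fun x => decide (PySem.Int.mod x 2 = 0)) numbers [] []]
  have hmap : (numbers.map (fun x => if PySem.Int.mod x 2 = 0 then x else -x))
      = (numbers.map (fun x => if (fun y => decide (PySem.Int.mod y 2 = 0)) x = true then x else -x)) := by
    simp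
  rw [hmap, who_win_signed_sum (fun x => decide (PySem.Int.mod x 2 = 0)) numbers]
  have hsplit := who_win_sum_split (fun x => decide (PySem.Int.mod x 2 = 0)) numbers
  simp only [List.nil_append]
  set e := (numbers.filter (fun x => decide (PySem.Int.mod x 2 = 0))).sum with he
  set o := (numbers.filter (fun x => !decide (PySem.Int.mod x 2 = 0))).sum with ho
  have h2 : (0:Int) < 2 := by omega
  by_cases hgt : e > o
  · have hd : e - o > 0 := by omega
    have hes : numbers.sum + (e - o) = 2 * e := by omega
    simp only [gt_iff_lt, hgt, sub_pos.mpr hgt, if_true, hes,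
      PySem.Int.floordiv_eq_ediv_of_pos h2, Int.mul_ediv_cancel_left _ (by omega : (2:Int) ≠ 0)]
  · by_cases hlt : e < o
    · have hos : numbers.sum - (e - o) = 2 * o := by omega
      simp only [gt_iff_lt, hgt, if_false, hlt, sub_pos, sub_neg, if_true, hos,
        PySem.Int.floordiv_eq_ediv_of_pos h2, Int.mul_ediv_cancel_left _ (by omega : (2:Int) ≠ 0)]
    · have : e = o := by omega
      simp [this]
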